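-- pv_equiv track=rewrite | github.com/ZentienceLabs/console-cockpit | alchemi/endpoints/control_plane_v1.py | _mask_sso_settings
-- ===== SOURCE A (Python) =====
-- from typing import Any, Dict, List, Optional
--
-- def _mask_sso_settings(settings: Dict[str, Any]) -> Dict[str, Any]:
--     masked = dict(settings or {})
--     secret_keys = {
--         "google_client_secret",
--         "microsoft_client_secret",
--         "generic_client_secret",
--         "client_secret",
--         "secret",
--     }
--     for key in secret_keys:
--         if masked.get(key):
--             masked[key] = "••••••••"
--     return masked
-- ===== SOURCE B (Python) =====
-- from typing import Any, Dict, List, Optional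
--
-- def _mask_sso_settings(settings: Dict[str, Any]) -> Dict[str, Any]:
--     secret_keys = {
--         "google_client_secret",
--         "microsoft_client_secret",
--         "generic_client_secret",
--         "client_secret",
--         "secret",
--     }
--     return {
--         k: ("••••••••" if k in secret_keys and v else v)
--         for k, v in (settings or {}).items()
--     }
-- ===== Notes on version B (the rewrite author's own statement) =====
-- stated objective: idiomatic
-- what changed: B is a single dict comprehension over the settings' own entries with a membership test against the secret-key set, instead of A's copy-then-mutate loop over the five secret keys with get() lookups.
import Mathlib
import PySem

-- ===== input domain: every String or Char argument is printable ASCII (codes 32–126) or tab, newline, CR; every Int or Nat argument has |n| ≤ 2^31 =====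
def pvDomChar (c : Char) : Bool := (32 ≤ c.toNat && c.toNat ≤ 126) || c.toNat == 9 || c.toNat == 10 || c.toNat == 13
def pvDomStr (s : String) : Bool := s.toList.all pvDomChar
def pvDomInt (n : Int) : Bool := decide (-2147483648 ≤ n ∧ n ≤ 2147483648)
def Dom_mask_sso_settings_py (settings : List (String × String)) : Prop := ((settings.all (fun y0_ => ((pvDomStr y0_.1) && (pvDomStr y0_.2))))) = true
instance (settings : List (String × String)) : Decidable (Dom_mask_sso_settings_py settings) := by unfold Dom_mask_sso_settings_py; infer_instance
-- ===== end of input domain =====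

-- B replaces A's copy-then-mutate loop over the five secret keys by one pass over the
-- settings' own entries (a dict comprehension with a set-membership test): idiomatic, same cost.


-- ===== PORT A =====
-- masked = dict(settings or {}); for key in secret_keys: if masked.get(key): masked[key] = "••••••••"
def mask_sso_settings_py (settings : List (String × String)) : List (String × String) :=
  let masked : PySem.Dict String String := PySem.Dict.mk settings
  let secret_keys : PySem.Set String := PySem.Set.ofList
    ["google_client_secret", "microsoft_client_secret", "generic_client_secret",
     "client_secret", "secret"]
  (secret_keys.foldl
    (fun d key => if d.getD key "" ≠ "" then d.insert key "••••••••" else d)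
    masked).items

-- ===== PORT B =====
-- {k: ("••••••••" if k in secret_keys and v else v) for k, v in (settings or {}).items()}
def mask_sso_settings_py_alt (settings : List (String × String)) : List (String × String) :=
  settings.map (fun p =>
    if p.1 ∈ PySem.Set.ofList
        ["google_client_secret", "microsoft_client_secret", "generic_client_secret",
         "client_secret", "secret"] ∧ p.2 ≠ ""
    then (p.1, "••••••••") else p)

-- ===== PRECONDITION & SPEC =====
-- Pre_ excludes association lists with duplicate keys: they do not arise from a Python dict
-- argument (dict construction collapses duplicates before A or B ever sees them).
def Pre_mask_sso_settings_py (settings : List (String × String)) : Prop :=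
  (settings.map Prod.fst).Nodup
instance (settings : List (String × String)) : Decidable (Pre_mask_sso_settings_py settings) := by unfold Pre_mask_sso_settings_py; infer_instance

def pvWitness_mask_sso_settings_py : (List (String × String)) :=
  [("client_secret", "abc"), ("secret", ""), ("issuer", "https://x")]

def Spec_mask_sso_settings_py (settings : List (String × String)) (out : List (String × String)) : Prop := out = mask_sso_settings_py_alt settings
instance (settings : List (String × String)) (out : List (String × String)) : Decidable (Spec_mask_sso_settings_py settings out) := by unfold Spec_mask_sso_settings_py; infer_instance

-- ===== CLAIM (what is proved, stated in full; the proofs are below) =====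
def Claim_equal_mask_sso_settings_py : Prop := ∀ (settings : List (String × String)), Dom_mask_sso_settings_py settings → Pre_mask_sso_settings_py settings → Spec_mask_sso_settings_py settings (mask_sso_settings_py settings)

-- ===== LEMMAS AND PROOFS =====

-- A's loop over any nodup key list ks, on a dict with nodup keys, rewrites the items
-- exactly like B's single map with a membership test against ks.
lemma mask_loop_items (ks : List String) (d : PySem.Dict String String)
    (hks : ks.Nodup) (hnd : d.keys.Nodup) :
    (ks.foldl (fun d key => if d.getD key "" ≠ "" then d.insert key "••••••••" else d) d).items
      = d.items.map (fun p => if p.1 ∈ ks ∧ p.2 ≠ "" then (p.1, "••••••••") else p) := by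
  induction ks generalizing d with
  | nil => simp
  | cons k ks ih =>
    simp only [List.foldl_cons]
    by_cases hc : d.getD k "" = ""
    · rw [if_neg (by simpa using hc), ih d hks.of_cons hnd]
      apply List.map_congr_left
      intro p hp
      by_cases hk : p.1 = k
      · have hv : p.2 = "" := by
          have := PySem.Dict.getD_of_mem_items d (k := p.1) (v := p.2) (by simpa using hp) hnd ""
          rw [hk] at this; rw [← this, hc]
        simp [hv]
      · simp [List.mem_cons, hk]
    · rw [if_pos (by simpa using hc)]
      have hcont : d.contains k = true := by
        cases h : d.contains k
        · exact absurd (PySem.Dict.getD_of_not_contains d "" h) hc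
        · rfl
      rw [ih _ hks.of_cons (PySem.Dict.nodup_keys_insert d k _ hnd),
          PySem.Dict.items_insert_of_contains d _ hcont, List.map_map]
      apply List.map_congr_left
      intro p hp
      by_cases hk : p.1 = k
      · have hv : p.2 ≠ "" := by
          have := PySem.Dict.getD_of_mem_items d (k := p.1) (v := p.2) (by simpa using hp) hnd ""
          rw [hk] at this; rw [← this]; exact hc
        have hknot : k ∉ ks := (List.nodup_cons.mp hks).1
        simp [Function.comp, hk, hknot, hv]
      · have : (p.1 == k) = false := by simpa using hk
        simp [Function.comp, this, List.mem_cons, hk]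

-- ===== VERDICT (by name: the statement is the Claim_ definition above) =====
theorem mask_sso_settings_py_spec : Claim_equal_mask_sso_settings_py := by
  intro settings _ hpre
  show mask_sso_settings_py settings = mask_sso_settings_py_alt settings
  unfold mask_sso_settings_py mask_sso_settings_py_alt
  rw [mask_loop_items _ _ (by decide)
      (by simpa [PySem.Dict.keys] using hpre)]
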